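-- pv_equiv track=rewrite | github.com/Pssolochi82/Trabalhos-academinos-python | exercicio_matrizes/matriz_operaçoes.py | contar_positivos_negativos_nulos
-- ===== SOURCE A (Python) =====
-- def contar_positivos_negativos_nulos(matriz):
--     positivos = negativos = nulos = 0
--     for linha in matriz:
--         for elemento in linha:
--             if elemento > 0:
--                 positivos += 1
--             elif elemento < 0:
--                 negativos += 1
--             else:
--                 nulos += 1
--     return positivos, negativos, nulos
-- ===== SOURCE B (Python) =====
-- def contar_positivos_negativos_nulos(matriz):
--     flat = [x for linha in matriz for x in linha]
--     positivos = sum(1 for x in flat if x > 0)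
--     negativos = sum(1 for x in flat if x < 0)
--     return positivos, negativos, len(flat) - positivos - negativos
-- ===== Notes on version B (the rewrite author's own statement) =====
-- stated objective: simpler
-- what changed: B flattens the matrix once and obtains the counts by filtering: positives and negatives are counted directly and the zero count is derived arithmetically as total - positives - negatives, replacing A's nested loop with a three-way elif chain over mutable accumulators.
import Mathlib
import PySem

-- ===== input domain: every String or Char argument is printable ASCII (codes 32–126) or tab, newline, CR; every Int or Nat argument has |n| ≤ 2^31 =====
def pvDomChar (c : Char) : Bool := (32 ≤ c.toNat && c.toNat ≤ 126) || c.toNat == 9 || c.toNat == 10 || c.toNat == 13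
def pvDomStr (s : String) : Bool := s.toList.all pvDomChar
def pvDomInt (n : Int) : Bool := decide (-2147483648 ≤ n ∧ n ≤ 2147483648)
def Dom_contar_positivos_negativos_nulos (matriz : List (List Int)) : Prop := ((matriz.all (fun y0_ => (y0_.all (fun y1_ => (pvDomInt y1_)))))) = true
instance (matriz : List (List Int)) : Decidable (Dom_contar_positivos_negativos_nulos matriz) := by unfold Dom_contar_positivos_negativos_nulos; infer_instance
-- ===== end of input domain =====

-- B flattens the matrix and counts positives/negatives by filtering, deriving the
-- zero count arithmetically as total - positives - negatives (objective: simpler).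


-- ===== PORT A =====
-- one if/elif/else step of A's inner loop over the accumulator (positivos, negativos, nulos)
def pvStepA (st : Int × Int × Int) (elemento : Int) : Int × Int × Int :=
  if elemento > 0 then (st.1 + 1, st.2.1, st.2.2)
  else if elemento < 0 then (st.1, st.2.1 + 1, st.2.2)
  else (st.1, st.2.1, st.2.2 + 1)

def contar_positivos_negativos_nulos (matriz : List (List Int)) : Int × Int × Int :=
  matriz.foldl (fun st linha => linha.foldl pvStepA st) (0, 0, 0)

-- ===== PORT B =====
def contar_positivos_negativos_nulos_alt (matriz : List (List Int)) : Int × Int × Int :=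
  let flat := matriz.flatMap (fun linha => linha)
  let positivos : Int := ((flat.filter (fun x => decide (x > 0))).length : Int)
  let negativos : Int := ((flat.filter (fun x => decide (x < 0))).length : Int)
  (positivos, negativos, (flat.length : Int) - positivos - negativos)

-- ===== PRECONDITION & SPEC =====
def Spec_contar_positivos_negativos_nulos (matriz : List (List Int)) (out : Int × Int × Int) : Prop := out = contar_positivos_negativos_nulos_alt matriz
instance (matriz : List (List Int)) (out : Int × Int × Int) : Decidable (Spec_contar_positivos_negativos_nulos matriz out) := by unfold Spec_contar_positivos_negativos_nulos; infer_instance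

-- ===== CLAIM (what is proved, stated in full; the proofs are below) =====
def Claim_equal_contar_positivos_negativos_nulos : Prop := ∀ (matriz : List (List Int)), Dom_contar_positivos_negativos_nulos matriz → Spec_contar_positivos_negativos_nulos matriz (contar_positivos_negativos_nulos matriz)

-- ===== LEMMAS AND PROOFS =====
-- counting abbreviations used by the proofs
def pvP (l : List Int) : Int := ((l.filter (fun x => decide (x > 0))).length : Int)
def pvN (l : List Int) : Int := ((l.filter (fun x => decide (x < 0))).length : Int)
def pvZ (l : List Int) : Int := ((l.filter (fun x => decide (x = 0))).length : Int)

theorem pvP_cons (x : Int) (l : List Int) :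
    pvP (x :: l) = (if x > 0 then 1 else 0) + pvP l := by
  simp [pvP, List.filter]; split_ifs with h <;> simp [h] <;> try omega

theorem pvN_cons (x : Int) (l : List Int) :
    pvN (x :: l) = (if x < 0 then 1 else 0) + pvN l := by
  simp [pvN, List.filter]; split_ifs with h <;> simp [h] <;> try omega

theorem pvZ_cons (x : Int) (l : List Int) :
    pvZ (x :: l) = (if x = 0 then 1 else 0) + pvZ l := by
  simp [pvZ, List.filter]; split_ifs with h <;> simp [h] <;> try omega

-- the inner loop adds the three counts of the row to the accumulator
theorem inner_loop (l : List Int) (p n z : Int) :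
    l.foldl pvStepA (p, n, z) = (p + pvP l, n + pvN l, z + pvZ l) := by
  induction l generalizing p n z with
  | nil => simp [pvP, pvN, pvZ]
  | cons x xs ih =>
      simp only [List.foldl, pvStepA, pvP_cons, pvN_cons, pvZ_cons]
      split_ifs with h1 h2 <;> rw [ih] <;> simp only [Prod.mk.injEq] <;>
        refine ⟨by omega, by omega, by omega⟩

-- every element is exactly one of the three kinds
theorem length_split (l : List Int) : (l.length : Int) = pvP l + pvN l + pvZ l := by
  induction l with
  | nil => simp [pvP, pvN, pvZ]
  | cons x xs ih =>
      simp only [List.length_cons, pvP_cons, pvN_cons, pvZ_cons]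
      push_cast
      by_cases h1 : x > 0 <;> by_cases h2 : x < 0 <;> by_cases h3 : x = 0 <;>
        simp [h1, h2, h3] <;> omega

theorem pvP_append (a b : List Int) : pvP (a ++ b) = pvP a + pvP b := by
  simp [pvP]
theorem pvN_append (a b : List Int) : pvN (a ++ b) = pvN a + pvN b := by
  simp [pvN]
theorem pvZ_append (a b : List Int) : pvZ (a ++ b) = pvZ a + pvZ b := by
  simp [pvZ]

theorem outer_loop (m : List (List Int)) (p n z : Int) :
    m.foldl (fun st linha => linha.foldl pvStepA st) (p, n, z)
      = (p + pvP (m.flatMap (fun l => l)), n + pvN (m.flatMap (fun l => l)),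
         z + pvZ (m.flatMap (fun l => l))) := by
  induction m generalizing p n z with
  | nil => simp [pvP, pvN, pvZ]
  | cons r rs ih =>
      simp only [List.foldl, inner_loop, List.flatMap_cons, pvP_append, pvN_append, pvZ_append]
      rw [ih]
      simp only [Prod.mk.injEq]
      refine ⟨by omega, by omega, by omega⟩

-- ===== VERDICT (by name: the statement is the Claim_ definition above) =====
theorem contar_positivos_negativos_nulos_spec : Claim_equal_contar_positivos_negativos_nulos := by
  intro matriz _
  unfold Spec_contar_positivos_negativos_nulos contar_positivos_negativos_nulos
    contar_positivos_negativos_nulos_alt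
  rw [outer_loop]
  have h := length_split (matriz.flatMap (fun l => l))
  refine Prod.ext (by simp [pvP]) (Prod.ext (by simp [pvN]) ?_)
  simp only []
  simp [pvP, pvN, pvZ] at h ⊢
  omega
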